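-- pv_equiv track=rewrite | github.com/Mason-Lin/practice | quiz/test_string_compression_ii.py | getOptimalCompression
-- ===== SOURCE A (Python) =====
-- import itertools
-- from functools import cache
--
-- def getOptimalCompression(s: str, k: int) -> str:
--     n = len(s)
--
--     @cache
--     def dp(idx, last_char, last_char_count, k, keep):
--         list_keep = list(keep)
--         if k < 0:
--             return float("inf"), keep
--         if idx == n:
--             return 0, keep
--
--         list_keep_remove = list_keep.copy()
--         list_keep_remove[idx] = "?"
--         delete_char, delete_char_keep = dp(idx + 1, last_char, last_char_count, k - 1, tuple(list_keep_remove))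
--         if s[idx] == last_char:
--             keep_char, keep_char_keep = dp(idx + 1, last_char, last_char_count + 1, k, tuple(list_keep))
--             keep_char += last_char_count in [1, 9, 99]
--         else:
--             keep_char, keep_char_keep = dp(idx + 1, s[idx], 1, k, tuple(list_keep))
--             keep_char += 1
--
--         if keep_char <= delete_char:
--             return keep_char, keep_char_keep
--         return delete_char, delete_char_keep
--
--     _count, res = dp(0, "", 0, k, tuple(s))
--     cleaned = [c for c in res if c != "?"]
--
--     ans = []
--     for c, g in itertools.groupby(cleaned):
--         group = list(g)
--         ans.append(f"{c}{len(group)}" if len(group) > 1 else c)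
--     return "".join(ans)
-- ===== SOURCE B (Python) =====
-- import itertools
-- from functools import cache
--
-- def getOptimalCompression(s: str, k: int) -> str:
--     n = len(s)
--     INF = float("inf")
--
--     @cache
--     def cost(idx, last, cnt, budget):
--         if idx == n:
--             return 0
--         delete_cost = INF if budget == 0 else cost(idx + 1, last, cnt, budget - 1)
--         if s[idx] == last:
--             keep_cost = cost(idx + 1, last, cnt + 1, budget) + (cnt in (1, 9, 99))
--         else:
--             keep_cost = cost(idx + 1, s[idx], 1, budget) + 1
--         return min(keep_cost, delete_cost)
--
--     kept = []
--     last, cnt, budget = "", 0, max(0, k)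
--     for idx in range(n):
--         delete_cost = INF if budget == 0 else cost(idx + 1, last, cnt, budget - 1)
--         if s[idx] == last:
--             keep_cost = cost(idx + 1, last, cnt + 1, budget) + (cnt in (1, 9, 99))
--             nl, nc = last, cnt + 1
--         else:
--             keep_cost = cost(idx + 1, s[idx], 1, budget) + 1
--             nl, nc = s[idx], 1
--         if keep_cost <= delete_cost:
--             kept.append(s[idx])
--             last, cnt = nl, nc
--         else:
--             budget -= 1
--
--     ans = []
--     for c, g in itertools.groupby(kept):
--         group = list(g)
--         ans.append(f"{c}{len(group)}" if len(group) > 1 else c)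
--     return "".join(ans)
-- ===== Notes on version B (the rewrite author's own statement) =====
-- stated objective: alternative
-- what changed: A memoizes on (idx,last,count,k,keep-tuple), threading the whole kept-character tuple through the recursion (its cache key carries the tuple, so states explode); B memoizes the cost on (idx,last,count,budget) alone and recovers the kept characters in a separate forward greedy pass over the cost function with the same keep-on-tie rule.
-- intended difference: On strings containing a literal '?' with k < len(s), A returns the compression with every kept '?' character silently dropped (it reuses '?' as its internal deletion marker), while B returns the run-length compression of the actually kept characters, which is the intended value (for k >= len(s) both delete everything and agree on ''). — e.g. on getOptimalCompression("?", 0): A returns "", B returns "?"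
import Mathlib
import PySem

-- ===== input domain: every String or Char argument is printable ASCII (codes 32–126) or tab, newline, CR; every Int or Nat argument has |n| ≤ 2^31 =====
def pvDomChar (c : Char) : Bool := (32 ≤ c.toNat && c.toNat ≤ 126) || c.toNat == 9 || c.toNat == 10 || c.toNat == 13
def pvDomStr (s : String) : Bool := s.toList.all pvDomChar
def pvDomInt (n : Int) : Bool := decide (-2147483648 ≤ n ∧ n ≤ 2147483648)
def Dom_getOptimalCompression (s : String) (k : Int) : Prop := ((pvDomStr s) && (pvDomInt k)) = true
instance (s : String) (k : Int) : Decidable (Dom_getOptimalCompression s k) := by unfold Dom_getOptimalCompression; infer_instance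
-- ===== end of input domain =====

-- B memoizes the cost on (idx,last,count,budget) only (A's memo key also carries the keep-tuple) and
-- reconstructs the kept characters in a forward pass; objective: alternative. Intended difference: B keeps
-- literal '?' characters that A drops (A reuses '?' as its deletion sentinel).

-- shared helpers: Python float('inf') cost lattice (none = inf)
def addC : Option Nat → Nat → Option Nat
  | none, _ => none
  | some a, b => some (a + b)

def leC : Option Nat → Option Nat → Bool
  | _, none => true
  | none, some _ => false
  | some a, some b => a ≤ b

-- shared helper: the final itertools.groupby run-length loop (identical in Source A and Source B)
def rleRun (c : Char) (cnt : Nat) : List Char :=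
  if cnt > 1 then c :: (PySem.Int.toStr (cnt : Int)).toList else [c]

def rleGo : List Char → Char → Nat → List Char
  | [], c, cnt => rleRun c cnt
  | x :: xs, c, cnt => if x = c then rleGo xs c (cnt + 1) else rleRun c cnt ++ rleGo xs x 1

def rleOfGroups : List Char → String
  | [] => ""
  | x :: xs => String.ofList (rleGo xs x 1)

-- ===== PORT A =====
def dpA (s : List Char) (n : Nat) : Nat → Nat → String → Nat → Int → List Char → Option Nat × List Char
  | fuel, idx, last, cnt, k, keep =>
    if k < 0 then (none, keep)
    else if idx = n then (some 0, keep)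
    else
      match fuel with
      | 0 => (some 0, keep)   -- unreachable when fuel = n - idx
      | fuel + 1 =>
        let keepRem := keep.set idx '?'
        let d := dpA s n fuel (idx + 1) last cnt (k - 1) keepRem
        let ci := s.getD idx ' '
        let kres :=
          if String.ofList [ci] = last then
            let r := dpA s n fuel (idx + 1) last (cnt + 1) k keep
            (addC r.1 (if cnt = 1 ∨ cnt = 9 ∨ cnt = 99 then 1 else 0), r.2)
          else
            let r := dpA s n fuel (idx + 1) (String.ofList [ci]) 1 k keep
            (addC r.1 1, r.2)
        if leC kres.1 d.1 then kres else d

def getOptimalCompression (s : String) (k : Int) : String :=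
  let cs := s.toList
  let n := cs.length
  let res := (dpA cs n n 0 "" 0 k cs).2
  let cleaned := res.filter (fun c => c != '?')
  rleOfGroups cleaned

-- ===== PORT B =====
def costB (s : List Char) (n : Nat) : Nat → Nat → String → Nat → Int → Option Nat
  | fuel, idx, last, cnt, k =>
    if idx = n then some 0
    else
      match fuel with
      | 0 => some 0   -- unreachable when fuel = n - idx
      | fuel + 1 =>
        let d := if k = 0 then none else costB s n fuel (idx + 1) last cnt (k - 1)
        let ci := s.getD idx ' '
        let kc :=
          if String.ofList [ci] = last then
            addC (costB s n fuel (idx + 1) last (cnt + 1) k) (if cnt = 1 ∨ cnt = 9 ∨ cnt = 99 then 1 else 0)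
          else
            addC (costB s n fuel (idx + 1) (String.ofList [ci]) 1 k) 1
        if leC kc d then kc else d

def loopB (s : List Char) (n : Nat) : Nat → Nat → String → Nat → Int → List Char → List Char
  | fuel, idx, last, cnt, budget, acc =>
    if idx = n then acc
    else
      match fuel with
      | 0 => acc
      | fuel + 1 =>
        let d := if budget = 0 then none else costB s n fuel (idx + 1) last cnt (budget - 1)
        let ci := s.getD idx ' '
        if String.ofList [ci] = last then
          let kc := addC (costB s n fuel (idx + 1) last (cnt + 1) budget) (if cnt = 1 ∨ cnt = 9 ∨ cnt = 99 then 1 else 0)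
          if leC kc d then loopB s n fuel (idx + 1) last (cnt + 1) budget (acc ++ [ci])
          else loopB s n fuel (idx + 1) last cnt (budget - 1) acc
        else
          let kc := addC (costB s n fuel (idx + 1) (String.ofList [ci]) 1 budget) 1
          if leC kc d then loopB s n fuel (idx + 1) (String.ofList [ci]) 1 budget (acc ++ [ci])
          else loopB s n fuel (idx + 1) last cnt (budget - 1) acc

def getOptimalCompression_alt (s : String) (k : Int) : String :=
  let cs := s.toList
  let n := cs.length
  rleOfGroups (loopB cs n n 0 "" 0 (max 0 k) [])

-- ===== PRECONDITION & SPEC =====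
-- On strings containing '?' with k < len(s), A returns the compression with every kept '?' silently
-- dropped (it reuses '?' as its deletion marker), while B returns the compression of the actual kept
-- characters; B's value is the intended one (for k >= len(s) both delete everything and agree on \"\").
def D_getOptimalCompression (s : String) (k : Int) : Prop :=
  '?' ∈ s.toList ∧ k < (s.toList.length : Int)
instance (s : String) (k : Int) : Decidable (D_getOptimalCompression s k) := by
  unfold D_getOptimalCompression; infer_instance

def Spec_getOptimalCompression (s : String) (k : Int) (out : String) : Prop :=
  ¬ D_getOptimalCompression s k → out = getOptimalCompression_alt s k
instance (s : String) (k : Int) (out : String) : Decidable (Spec_getOptimalCompression s k out) := by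
  unfold Spec_getOptimalCompression; infer_instance

def pvDiffWitness_getOptimalCompression : String × Int := ("?", 0)
def pvDiffWitnessOut_getOptimalCompression : String × String := ("", "?")

-- ===== CLAIM (what is proved, stated in full; the proofs are below) =====
def Claim_unchanged_getOptimalCompression : Prop := ∀ (s : String) (k : Int), Dom_getOptimalCompression s k → Spec_getOptimalCompression s k (getOptimalCompression s k)
def Claim_changed_getOptimalCompression : Prop := Dom_getOptimalCompression (pvDiffWitness_getOptimalCompression.1) (pvDiffWitness_getOptimalCompression.2) ∧ D_getOptimalCompression (pvDiffWitness_getOptimalCompression.1) (pvDiffWitness_getOptimalCompression.2) ∧ getOptimalCompression (pvDiffWitness_getOptimalCompression.1) (pvDiffWitness_getOptimalCompression.2) = pvDiffWitnessOut_getOptimalCompression.1 ∧ getOptimalCompression_alt (pvDiffWitness_getOptimalCompression.1) (pvDiffWitness_getOptimalCompression.2) = pvDiffWitnessOut_getOptimalCompression.2 ∧ pvDiffWitnessOut_getOptimalCompression.1 ≠ pvDiffWitnessOut_getOptimalCompression.2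

-- ===== LEMMAS AND PROOFS =====

theorem fst_ite {α β : Type} (b : Prop) [Decidable b] (x : α) (y : β) (q : α × β) :
    (if b then (x, y) else q).1 = if b then x else q.1 := by split <;> rfl

theorem dpA_fst (s : List Char) (n : Nat) :
    ∀ (fuel idx : Nat) (last : String) (cnt : Nat) (k : Int) (keep : List Char), 0 ≤ k →
      (dpA s n fuel idx last cnt k keep).1 = costB s n fuel idx last cnt k := by
  intro fuel
  induction fuel with
  | zero =>
    intro idx last cnt k keep hk
    rw [dpA, costB]
    have : ¬ k < 0 := by omega
    simp [this]
  | succ fuel ih =>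
    intro idx last cnt k keep hk
    rw [dpA, costB]
    have hk0 : ¬ k < 0 := by omega
    simp only [hk0, if_false]
    by_cases hidx : idx = n
    · simp [hidx]
    · simp only [hidx, if_false]
      have hd : (dpA s n fuel (idx+1) last cnt (k-1) (keep.set idx '?')).1
          = if k = 0 then none else costB s n fuel (idx+1) last cnt (k-1) := by
        by_cases hke : k = 0
        · subst hke; rw [dpA.eq_def]; simp
        · rw [if_neg hke, ih _ _ _ _ _ (by omega)]
      by_cases hc : String.ofList [s.getD idx ' '] = last
      · simp only [hc, if_true, hd, ih _ _ _ _ _ hk]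
        rw [fst_ite, hd]
      · simp only [hc, if_false, hd, ih _ _ _ _ _ hk]
        rw [fst_ite, hd]

theorem loopB_acc (s : List Char) (n : Nat) :
    ∀ (fuel idx : Nat) (last : String) (cnt : Nat) (budget : Int) (acc : List Char),
      loopB s n fuel idx last cnt budget acc = acc ++ loopB s n fuel idx last cnt budget [] := by
  intro fuel
  induction fuel with
  | zero =>
    intro idx last cnt budget acc
    rw [loopB, loopB]
    split <;> simp
  | succ fuel ih =>
    intro idx last cnt budget acc
    rw [loopB, loopB]
    by_cases hidx : idx = n
    · simp [hidx]
    · simp only [hidx, if_false]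
      split <;> (try split) <;> (try split) <;>
        first
          | (rw [ih _ _ _ _ (acc ++ [s.getD idx ' ']), ih _ _ _ _ ([] ++ [s.getD idx ' '])]; simp; done)
          | (rw [ih _ _ _ _ (acc ++ [s.getD idx ' ']), ih _ _ _ _ ([] ++ [s.getD idx ' '])];
             split <;> simp [ih _ _ _ _ acc])
          | exact ih _ _ _ _ acc

theorem loopB_zero (s : List Char) (n : Nat) (hn : s.length = n) :
    ∀ (fuel idx : Nat) (last : String) (cnt : Nat) (acc : List Char), idx + fuel = n →
      loopB s n fuel idx last cnt 0 acc = acc ++ s.drop idx := by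
  intro fuel
  induction fuel with
  | zero =>
    intro idx last cnt acc hfi
    rw [loopB]
    have hidx : idx = n := by omega
    rw [if_pos hidx, List.drop_of_length_le (by omega : s.length ≤ idx)]
    simp
  | succ fuel ih =>
    intro idx last cnt acc hfi
    rw [loopB]
    have hidx : ¬ idx = n := by omega
    rw [if_neg hidx]
    have hlt : idx < s.length := by omega
    have hdrop : s.drop idx = s[idx] :: s.drop (idx + 1) := List.drop_eq_getElem_cons hlt
    have hgd : s.getD idx ' ' = s[idx] := by
      simp [List.getD_eq_getElem?_getD, List.getElem?_eq_getElem hlt]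
    by_cases hc : String.ofList [s.getD idx ' '] = last
    · rw [if_pos hc]
      have hle : leC (addC (costB s n fuel (idx + 1) last (cnt + 1) 0)
          (if cnt = 1 ∨ cnt = 9 ∨ cnt = 99 then 1 else 0)) (if (0:Int) = 0 then none else
            costB s n fuel (idx + 1) last cnt (0 - 1)) = true := by
        simp [leC]
      rw [if_pos hle, ih _ _ _ _ (by omega), hdrop, hgd]
      simp
    · rw [if_neg hc]
      have hle : leC (addC (costB s n fuel (idx + 1) (String.ofList [s.getD idx ' ']) 1 0) 1)
          (if (0:Int) = 0 then none else costB s n fuel (idx + 1) last cnt (0 - 1)) = true := by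
        simp [leC]
      rw [if_pos hle, ih _ _ _ _ (by omega), hdrop, hgd]
      simp

theorem snd_ite {α β : Type} (b : Prop) [Decidable b] (x : α) (y : β) (q : α × β) :
    (if b then (x, y) else q).2 = if b then y else q.2 := by split <;> rfl

theorem dpA_snd (s : List Char) (n : Nat) (hn : s.length = n) (hq : '?' ∉ s) :
    ∀ (fuel idx : Nat) (last : String) (cnt : Nat) (k : Int) (keep : List Char),
      0 ≤ k → idx + fuel = n → keep.length = n → keep.drop idx = s.drop idx →
      ((dpA s n fuel idx last cnt k keep).2).filter (fun c => c != '?') =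
        (keep.take idx).filter (fun c => c != '?') ++ loopB s n fuel idx last cnt k [] := by
  intro fuel
  induction fuel with
  | zero =>
    intro idx last cnt k keep hk hfi hlen hdr
    have hidx : idx = n := by omega
    rw [dpA, loopB, if_neg (by omega : ¬ k < 0), if_pos hidx, if_pos hidx]
    rw [List.take_of_length_le (by omega : keep.length ≤ idx)]
    simp
  | succ fuel ih =>
    intro idx last cnt k keep hk hfi hlen hdr
    have hidx : ¬ idx = n := by omega
    have hlt : idx < s.length := by omega
    have hkl : idx < keep.length := by omega
    have hgd : s.getD idx ' ' = s[idx] := by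
      simp [List.getD_eq_getElem?_getD, List.getElem?_eq_getElem hlt]
    have hkeepidx : keep[idx]? = some s[idx] := by
      rw [← List.head?_drop, hdr, List.head?_drop, List.getElem?_eq_getElem hlt]
    have hcne : (s[idx] != '?') = true := by
      simp only [bne_iff_ne, ne_eq]
      intro h; exact hq (h ▸ List.getElem_mem hlt)
    have hd1 : (dpA s n fuel (idx + 1) last cnt (k - 1) (keep.set idx '?')).1
        = if k = 0 then none else costB s n fuel (idx + 1) last cnt (k - 1) := by
      by_cases hke : k = 0
      · subst hke; rw [dpA.eq_def]; simp
      · rw [if_neg hke, dpA_fst s n _ _ _ _ _ _ (by omega)]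
    have htake : keep.take (idx + 1) = keep.take idx ++ [s[idx]] := by
      rw [List.take_add_one, List.getElem?_eq_getElem hkl]
      have : keep[idx] = s[idx] := by
        have := hkeepidx; rwa [List.getElem?_eq_getElem hkl, Option.some_inj] at this
      simp [this]
    have hdr1 : keep.drop (idx + 1) = s.drop (idx + 1) := by
      rw [← List.tail_drop, ← List.tail_drop, hdr]
    have hsetlen : (keep.set idx '?').length = n := by simp [hlen]
    have hsetdrop : (keep.set idx '?').drop (idx + 1) = s.drop (idx + 1) := by
      rw [List.drop_set]
      simp [hdr1]
    have hsettake : ((keep.set idx '?').take (idx + 1)).filter (fun c => c != '?')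
        = (keep.take idx).filter (fun c => c != '?') := by
      rw [List.take_set, htake]
      have hset : (keep.take idx ++ [s[idx]]).set idx '?' = keep.take idx ++ ['?'] := by
        rw [List.set_append_right _ _ (by simp [Nat.min_eq_left (le_of_lt hkl)])]
        simp [List.length_take, Nat.min_eq_left (le_of_lt hkl)]
      rw [hset, List.filter_append]
      simp
    rw [dpA, loopB]
    simp only [if_neg (show ¬ k < 0 by omega), if_neg hidx]
    by_cases hc : String.ofList [s.getD idx ' '] = last
    · simp only [if_pos hc]
      rw [snd_ite, apply_ite (List.filter (fun c => c != '?'))]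
      rw [dpA_fst s n _ _ _ _ _ keep hk, hd1]
      by_cases hle : leC (addC (costB s n fuel (idx + 1) last (cnt + 1) k)
          (if cnt = 1 ∨ cnt = 9 ∨ cnt = 99 then 1 else 0))
          (if k = 0 then none else costB s n fuel (idx + 1) last cnt (k - 1)) = true
      · rw [if_pos hle, if_pos hle]
        rw [ih (idx + 1) last (cnt + 1) k keep hk (by omega) hlen hdr1]
        rw [loopB_acc s n fuel (idx + 1) last (cnt + 1) k ([] ++ [s.getD idx ' '])]
        rw [htake, List.filter_append, hgd]
        simp [hcne]
      · rw [if_neg hle, if_neg hle]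
        have hk1 : (1:Int) ≤ k := by
          by_contra h
          have hke : k = 0 := by omega
          apply hle
          rw [if_pos hke]
          generalize addC (costB s n fuel (idx + 1) last (cnt + 1) k)
            (if cnt = 1 ∨ cnt = 9 ∨ cnt = 99 then 1 else 0) = kc
          cases kc <;> simp [leC]
        rw [ih (idx + 1) last cnt (k - 1) (keep.set idx '?') (by omega) (by omega) hsetlen hsetdrop]
        rw [hsettake]
    · simp only [if_neg hc]
      rw [snd_ite, apply_ite (List.filter (fun c => c != '?'))]
      rw [dpA_fst s n _ _ _ _ _ keep hk, hd1]
      by_cases hle : leC (addC (costB s n fuel (idx + 1) (String.ofList [s.getD idx ' ']) 1 k) 1)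
          (if k = 0 then none else costB s n fuel (idx + 1) last cnt (k - 1)) = true
      · rw [if_pos hle, if_pos hle]
        rw [ih (idx + 1) (String.ofList [s.getD idx ' ']) 1 k keep hk (by omega) hlen hdr1]
        rw [loopB_acc s n fuel (idx + 1) (String.ofList [s.getD idx ' ']) 1 k ([] ++ [s.getD idx ' '])]
        rw [htake, List.filter_append, hgd]
        simp [hcne]
      · rw [if_neg hle, if_neg hle]
        have hk1 : (1:Int) ≤ k := by
          by_contra h
          have hke : k = 0 := by omega
          apply hle
          rw [if_pos hke]
          generalize addC (costB s n fuel (idx + 1) (String.ofList [s.getD idx ' ']) 1 k) 1 = kc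
          cases kc <;> simp [leC]
        rw [ih (idx + 1) last cnt (k - 1) (keep.set idx '?') (by omega) (by omega) hsetlen hsetdrop]
        rw [hsettake]


theorem filter_settake (keep : List Char) (idx : Nat) (h : idx < keep.length) :
    ((keep.set idx '?').take (idx + 1)).filter (fun c => c != '?')
      = (keep.take idx).filter (fun c => c != '?') := by
  rw [List.take_set, List.take_add_one, List.getElem?_eq_getElem h]
  have hset : (keep.take idx ++ [keep[idx]]).set idx '?' = keep.take idx ++ ['?'] := by
    rw [List.set_append_right _ _ (by simp [Nat.min_eq_left (le_of_lt h)])]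
    simp [List.length_take, Nat.min_eq_left (le_of_lt h)]
  simp only [Option.toList_some]
  rw [hset, List.filter_append]
  simp

theorem minC_some_zero (kc : Option Nat) :
    (if leC kc (some 0) = true then kc else some 0) = some 0 := by
  cases kc with
  | none => simp [leC]
  | some m =>
    simp only [leC]
    split <;> rename_i h
    · have hm : m ≤ 0 := by simpa using h
      simp [Nat.le_zero.mp hm]
    · rfl

theorem costB_all_del (s : List Char) (n : Nat) :
    ∀ (fuel idx : Nat) (last : String) (cnt : Nat) (k : Int),
      idx + fuel = n → (n : Int) - idx ≤ k →
      costB s n fuel idx last cnt k = some 0 := by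
  intro fuel
  induction fuel with
  | zero =>
    intro idx last cnt k hfi hk
    rw [costB, if_pos (by omega : idx = n)]
  | succ fuel ih =>
    intro idx last cnt k hfi hk
    rw [costB]
    simp only [if_neg (show ¬ idx = n by omega), if_neg (show ¬ k = 0 by omega),
      ih (idx + 1) last cnt (k - 1) (by omega) (by push_cast; omega)]
    exact minC_some_zero _

theorem ofList_single_ne_empty (c : Char) : String.ofList [c] ≠ "" := by
  intro h
  have := congrArg String.toList h
  simp at this

theorem loopB_all_del (s : List Char) (n : Nat) :
    ∀ (fuel idx : Nat) (cnt : Nat) (k : Int) (acc : List Char),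
      idx + fuel = n → (n : Int) - idx ≤ k →
      loopB s n fuel idx "" cnt k acc = acc := by
  intro fuel
  induction fuel with
  | zero =>
    intro idx cnt k acc hfi hk
    rw [loopB, if_pos (by omega : idx = n)]
  | succ fuel ih =>
    intro idx cnt k acc hfi hk
    rw [loopB]
    simp only [if_neg (show ¬ idx = n by omega),
      if_neg (ofList_single_ne_empty (s.getD idx ' ')),
      if_neg (show ¬ k = 0 by omega),
      costB_all_del s n fuel (idx + 1) "" cnt (k - 1) (by omega) (by push_cast; omega)]
    have hfalse : leC (addC (costB s n fuel (idx + 1) (String.ofList [s.getD idx ' ']) 1 k) 1)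
        (some 0) = false := by
      generalize costB s n fuel (idx + 1) (String.ofList [s.getD idx ' ']) 1 k = c0
      cases c0 <;> simp [addC, leC]
    rw [hfalse]
    simp only [Bool.false_eq_true, if_false]
    exact ih (idx + 1) cnt (k - 1) acc (by omega) (by push_cast; omega)

theorem dpA_all_del (s : List Char) (n : Nat) :
    ∀ (fuel idx : Nat) (cnt : Nat) (k : Int) (keep : List Char),
      idx + fuel = n → (n : Int) - idx ≤ k → keep.length = n →
      ((dpA s n fuel idx "" cnt k keep).2).filter (fun c => c != '?')
        = (keep.take idx).filter (fun c => c != '?') := by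
  intro fuel
  induction fuel with
  | zero =>
    intro idx cnt k keep hfi hk hlen
    rw [dpA, if_neg (by omega : ¬ k < 0), if_pos (by omega : idx = n)]
    rw [List.take_of_length_le (by omega : keep.length ≤ idx)]
  | succ fuel ih =>
    intro idx cnt k keep hfi hk hlen
    rw [dpA]
    simp only [if_neg (show ¬ k < 0 by omega), if_neg (show ¬ idx = n by omega)]
    simp only [if_neg (ofList_single_ne_empty (s.getD idx ' '))]
    rw [snd_ite, apply_ite (List.filter (fun c => c != '?'))]
    rw [dpA_fst s n _ _ _ _ _ keep (by omega)]
    have hd1 : (dpA s n fuel (idx + 1) "" cnt (k - 1) (keep.set idx '?')).1 = some 0 := by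
      rw [dpA_fst s n _ _ _ _ _ _ (by omega)]
      exact costB_all_del s n fuel (idx + 1) "" cnt (k - 1) (by omega) (by push_cast; omega)
    rw [hd1]
    have hfalse : leC (addC (costB s n fuel (idx + 1) (String.ofList [s.getD idx ' ']) 1 k) 1)
        (some 0) = false := by
      generalize costB s n fuel (idx + 1) (String.ofList [s.getD idx ' ']) 1 k = c0
      cases c0 <;> simp [addC, leC]
    rw [hfalse]
    simp only [Bool.false_eq_true, if_false]
    rw [ih (idx + 1) cnt (k - 1) (keep.set idx '?') (by omega) (by push_cast; omega) (by simp [hlen])]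
    exact filter_settake keep idx (by omega)


theorem getOptimalCompression_equal : ∀ (s : String) (k : Int),
    '?' ∉ s.toList → getOptimalCompression s k = getOptimalCompression_alt s k := by
  intro s k hq
  simp only [getOptimalCompression, getOptimalCompression_alt]
  by_cases hk : k < 0
  · rw [dpA.eq_def]
    simp only [if_pos hk]
    have hm : max 0 k = 0 := max_eq_left (by omega)
    rw [hm, loopB_zero s.toList s.toList.length rfl s.toList.length 0 "" 0 [] (by omega)]
    rw [List.filter_eq_self.mpr (fun c hc => by
      simp only [bne_iff_ne, ne_eq]
      intro h; exact hq (h ▸ hc))]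
    simp
  · have hk0 : 0 ≤ k := by omega
    have hm : max 0 k = k := max_eq_right hk0
    rw [hm]
    have h := dpA_snd s.toList s.toList.length rfl hq s.toList.length 0 "" 0 k s.toList
      hk0 (by omega) rfl rfl
    simp only [List.take_zero, List.filter_nil, List.nil_append] at h
    rw [h]

-- ===== VERDICT (by name: the statement is the Claim_ definition above) =====

theorem getOptimalCompression_big (s : String) (k : Int)
    (hk : (s.toList.length : Int) ≤ k) :
    getOptimalCompression s k = getOptimalCompression_alt s k := by
  simp only [getOptimalCompression, getOptimalCompression_alt]
  have hk0 : 0 ≤ k := le_trans (by positivity) hk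
  rw [dpA_all_del s.toList s.toList.length s.toList.length 0 0 k s.toList (by omega) (by omega) rfl]
  rw [max_eq_right hk0]
  rw [loopB_all_del s.toList s.toList.length s.toList.length 0 0 k [] (by omega) (by omega)]
  simp

theorem getOptimalCompression_spec : Claim_unchanged_getOptimalCompression := by
  intro s k _hdom hq
  by_cases hqs : '?' ∈ s.toList
  · have hkn : (s.toList.length : Int) ≤ k := by
      by_contra h
      exact hq ⟨hqs, by omega⟩
    exact getOptimalCompression_big s k hkn
  · exact getOptimalCompression_equal s k hqs

theorem getOptimalCompression_changed : Claim_changed_getOptimalCompression := by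
  unfold Claim_changed_getOptimalCompression; decide
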